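-- pv_equiv track=rewrite | github.com/Yego001/brokerApp | main/catalogue/account_sale.py | last2
-- ===== SOURCE A (Python) =====
-- def last2(s):
--     s = str(s)
--     length = len(s)
--     val = ''
--     counter = 0
--     for v in s:
--         if(counter >= length-2):
--             val += s[counter]
--         counter += 1
--     return val
-- ===== SOURCE B (Python) =====
-- def last2(s):
--     return str(s)[-2:]
-- ===== Notes on version B (the rewrite author's own statement) =====
-- stated objective: simpler
-- what changed: Replaces the counter-driven scan that rebuilds the suffix character by character with the closed-form slice str(s)[-2:]; no loop, counter or accumulator remains.
import Mathlib
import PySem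

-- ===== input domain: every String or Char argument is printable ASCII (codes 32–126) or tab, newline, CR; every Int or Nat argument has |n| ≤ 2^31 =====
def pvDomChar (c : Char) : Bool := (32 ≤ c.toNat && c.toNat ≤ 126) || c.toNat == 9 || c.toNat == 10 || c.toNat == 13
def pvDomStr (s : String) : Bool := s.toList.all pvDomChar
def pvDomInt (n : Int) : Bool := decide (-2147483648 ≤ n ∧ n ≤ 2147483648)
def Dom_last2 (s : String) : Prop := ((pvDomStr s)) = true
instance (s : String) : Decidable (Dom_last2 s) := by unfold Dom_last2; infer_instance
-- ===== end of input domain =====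

-- B replaces A's counter-driven character-copying loop with the closed-form slice s[-2:] (simpler).

-- ===== PORT A =====
-- literal port: counter loop over the characters, appending s[counter] once counter ≥ len-2
def last2 (s : String) : String :=
  let cs := s.toList
  let length : Int := cs.length
  String.ofList (cs.foldl
    (fun (st : List Char × Int) _v =>
      ((if st.2 ≥ length - 2 then
          match PySem.List.pyGet? cs st.2 with
          | some c => st.1 ++ [c]
          | none => st.1   -- unreachable: the counter always indexes inside cs
        else st.1), st.2 + 1))
    ([], 0)).1

-- ===== PORT B =====
def last2_alt (s : String) : String :=
  String.ofList (PySem.List.slice s.toList (some (-2)) none)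

-- ===== PRECONDITION & SPEC =====
def Spec_last2 (s : String) (out : String) : Prop := out = last2_alt s
instance (s : String) (out : String) : Decidable (Spec_last2 s out) := by unfold Spec_last2; infer_instance

-- ===== CLAIM (what is proved, stated in full; the proofs are below) =====
def Claim_equal_last2 : Prop := ∀ (s : String), Dom_last2 s → Spec_last2 s (last2 s)

-- ===== LEMMAS AND PROOFS =====

-- invariant of A's loop: folding over the suffix of cs starting at position k
-- appends exactly the characters of cs at positions ≥ max k (len-2)
lemma last2_loop (cs : List Char) :
    ∀ (l acc : List Char) (k : ℕ), cs.drop k = l →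
    (l.foldl
      (fun (st : List Char × Int) _v =>
        ((if st.2 ≥ (cs.length : Int) - 2 then
            match PySem.List.pyGet? cs st.2 with
            | some c => st.1 ++ [c]
            | none => st.1
          else st.1), st.2 + 1))
      (acc, (k : Int))).1
    = acc ++ cs.drop (max k (cs.length - 2)) := by
  intro l
  induction l with
  | nil =>
    intro acc k hk
    have hlen : cs.length ≤ k := by
      by_contra h
      have := List.drop_eq_nil_iff.mp hk
      omega
    simp [List.drop_eq_nil_iff.mpr (by omega : cs.length ≤ max k (cs.length - 2))]
  | cons c l ih =>
    intro acc k hk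
    have hklt : k < cs.length := by
      by_contra h
      rw [List.drop_eq_nil_iff.mpr (by omega)] at hk
      simp at hk
    have hget : cs[k] = c := by
      have h0 : (cs.drop k)[0]'(by rw [hk]; simp) = c := by simp [hk]
      rw [List.getElem_drop] at h0
      simpa using h0
    have hdrop : cs.drop (k + 1) = l := by
      have := List.drop_drop (i := 1) (j := k) (l := cs)
      rw [← this, hk]
      simp
    have hpy : PySem.List.pyGet? cs (k : Int) = some c := by
      rw [PySem.List.pyGet?_natCast]
      simp [hget, hklt]
    simp only [List.foldl_cons]
    by_cases hge : (k : Int) ≥ (cs.length : Int) - 2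
    · have h1 : ((k : Int) + 1) = ((k + 1 : ℕ) : Int) := by push_cast; ring
      rw [if_pos hge, hpy]
      rw [h1, ih (acc ++ [c]) (k + 1) hdrop]
      have hmax : max k (cs.length - 2) = k := by omega
      have hmax' : max (k + 1) (cs.length - 2) = k + 1 := by omega
      rw [hmax, hmax']
      have : cs.drop k = c :: cs.drop (k + 1) := by
        rw [hk, hdrop]
      rw [this]
      simp
    · have h1 : ((k : Int) + 1) = ((k + 1 : ℕ) : Int) := by push_cast; ring
      rw [if_neg hge]
      rw [h1, ih acc (k + 1) hdrop]
      have : max k (cs.length - 2) = max (k + 1) (cs.length - 2) := by omega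
      rw [this]

-- ===== VERDICT (by name: the statement is the Claim_ definition above) =====
theorem last2_spec : Claim_equal_last2 := by
  intro s _
  unfold Spec_last2 last2 last2_alt
  simp only []
  have h := last2_loop s.toList s.toList [] 0 (by simp)
  simp only [Nat.cast_zero] at h
  rw [h]
  rw [PySem.List.slice_from_neg_ofNat s.toList 2 (by omega)]
  simp
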